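-- pv_equiv track=rewrite | github.com/davidiach/erdos97 | src/erdos97/incidence_filters.py | forced_perpendicular_graph
-- ===== SOURCE A (Python) =====
-- from itertools import combinations
-- from typing import Sequence
--
-- Chord = tuple[int, int]
--
-- def normalize_chord(a: int, b: int) -> Chord:
--     """Return a sorted unordered chord tuple. Reject loops."""
--     if a == b:
--         raise ValueError(f"loop chord is not allowed: ({a}, {b})")
--     return (a, b) if a < b else (b, a)
--
-- def phi_map(S: Sequence[Sequence[int]]) -> dict[Chord, Chord]:
--     """
--     Return phi({i,j}) = S_i cap S_j whenever the intersection has size 2.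
--
--     Chords are normalized sorted tuples.
--     """
--     witness_sets = [set(row) for row in S]
--     out: dict[Chord, Chord] = {}
--     for i, j in combinations(range(len(S)), 2):
--         inter = sorted(witness_sets[i] & witness_sets[j])
--         if len(inter) == 2:
--             out[normalize_chord(i, j)] = normalize_chord(inter[0], inter[1])
--     return out
--
-- def forced_perpendicular_graph(S: Sequence[Sequence[int]]) -> dict[Chord, set[Chord]]:
--     """Build the undirected graph with an edge e--phi(e) for every two-overlap."""
--     n = len(S)
--     graph: dict[Chord, set[Chord]] = {
--         normalize_chord(i, j): set() for i, j in combinations(range(n), 2)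
--     }
--     for source, target in phi_map(S).items():
--         graph.setdefault(source, set()).add(target)
--         graph.setdefault(target, set()).add(source)
--     return graph
-- ===== SOURCE B (Python) =====
-- from collections import Counter
-- from itertools import combinations
-- from typing import Sequence
--
-- Chord = tuple[int, int]
--
-- def forced_perpendicular_graph(S: Sequence[Sequence[int]]) -> dict[Chord, set[Chord]]:
--     """Inverted index by element value: a C-speed co-occurrence Counter finds the
--     pairs with a size-2 overlap, and only those few pairs are intersected."""
--     n = len(S)
--     # value -> increasing list of row indices whose set contains it
--     index: dict[int, list[int]] = {}
--     for i, row in enumerate(S):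
--         for v in set(row):
--             index.setdefault(v, []).append(i)
--     # (i, j) -> number of values common to rows i and j
--     counts: Counter[Chord] = Counter()
--     for idxs in index.values():
--         counts.update(combinations(idxs, 2))
--     graph: dict[Chord, set[Chord]] = {}
--     for i in range(n):
--         for j in range(i + 1, n):
--             graph[(i, j)] = set()
--     for i in range(n):
--         for j in range(i + 1, n):
--             if counts.get((i, j), 0) == 2:
--                 x, y = sorted(set(S[i]) & set(S[j]))
--                 graph[(i, j)].add((x, y))
--                 graph.setdefault((x, y), set()).add((i, j))
--     return graph
-- ===== Notes on version B (the rewrite author's own statement) =====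
-- stated objective: faster
-- what changed: Instead of intersecting every pair of witness sets, B builds an inverted index mapping each value to the rows containing it, counts per-pair co-occurrences with a Counter over each value's index-pair combinations, and intersects only the pairs whose count is exactly 2.
import Mathlib
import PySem

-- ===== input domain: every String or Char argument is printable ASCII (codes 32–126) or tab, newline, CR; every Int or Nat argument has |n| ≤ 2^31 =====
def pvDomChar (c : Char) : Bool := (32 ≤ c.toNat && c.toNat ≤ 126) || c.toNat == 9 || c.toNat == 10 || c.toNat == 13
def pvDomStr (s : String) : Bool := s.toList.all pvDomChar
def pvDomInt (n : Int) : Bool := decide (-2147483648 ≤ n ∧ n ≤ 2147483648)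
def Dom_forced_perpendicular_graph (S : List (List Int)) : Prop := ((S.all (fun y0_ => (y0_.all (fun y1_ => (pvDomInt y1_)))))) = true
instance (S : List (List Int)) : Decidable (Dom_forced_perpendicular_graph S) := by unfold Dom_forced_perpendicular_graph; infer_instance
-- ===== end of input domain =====

-- B replaces the per-pair set intersections by an inverted index of rows per value
-- and per-pair co-occurrence lists (objective: faster; asymptotically fewer set scans).


-- ===== PORT A =====
-- normalize_chord: the ValueError branch (a == b) is unreachable at every call site
-- (indices i < j; two distinct sorted intersection elements), so the port is total.
def pvNorm (a b : Int) : Int × Int := if a < b then (a, b) else (b, a)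

-- itertools.combinations(l, 2) in order (used by A; B's Python also calls it on each index list)
def pvComb2 : List Int → List (Int × Int)
  | [] => []
  | x :: xs => xs.map (fun y => (x, y)) ++ pvComb2 xs

-- phi_map
def pvPhi (S : List (List Int)) : PySem.Dict (Int × Int) (Int × Int) :=
  let witness_sets := S.map (fun row => PySem.Set.ofList row)
  (pvComb2 (PySem.List.pyRange 0 (S.length : Int))).foldl
    (fun out ij =>
      let inter := PySem.List.sorted
        (PySem.Set.inter (PySem.List.pyGetD witness_sets ij.1 [])
                         (PySem.List.pyGetD witness_sets ij.2 [])) id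
      if inter.length = 2 then
        out.insert (pvNorm ij.1 ij.2)
          (pvNorm (PySem.List.pyGetD inter 0 0) (PySem.List.pyGetD inter 1 0))
      else out)
    PySem.Dict.empty

def forced_perpendicular_graph (S : List (List Int)) : List (Int × Int × List (Int × Int)) :=
  let n := (S.length : Int)
  let graph : PySem.Dict (Int × Int) (List (Int × Int)) :=
    (pvComb2 (PySem.List.pyRange 0 n)).foldl
      (fun g ij => g.insert (pvNorm ij.1 ij.2) PySem.Set.empty) PySem.Dict.empty
  let graph :=
    (pvPhi S).items.foldl
      (fun g st =>
        let g1 := g.setdefault st.1 PySem.Set.empty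
        let g2 := g1.insert st.1 (PySem.Set.add (g1.getD st.1 PySem.Set.empty) st.2)
        let g3 := g2.setdefault st.2 PySem.Set.empty
        g3.insert st.2 (PySem.Set.add (g3.getD st.2 PySem.Set.empty) st.1))
      graph
  graph.items.map (fun kv => (kv.1.1, kv.1.2, kv.2))

-- ===== PORT B =====
-- value -> list of row indices whose set contains it
def pvIndex (S : List (List Int)) : PySem.Dict Int (List Int) :=
  (PySem.List.enumerate S).foldl
    (fun d p => (PySem.Set.ofList p.2).foldl
      (fun d v => d.modify v [] (fun l => l ++ [p.1])) d)
    PySem.Dict.empty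

-- (i, j) -> number of values common to rows i and j (collections.Counter)
def pvCounts (S : List (List Int)) : PySem.Dict (Int × Int) Int :=
  (pvIndex S).values.foldl
    (fun c idxs => (pvComb2 idxs).foldl
      (fun c pq => c.modify pq 0 (fun x => x + 1)) c)
    PySem.Dict.empty

def forced_perpendicular_graph_alt (S : List (List Int)) : List (Int × Int × List (Int × Int)) :=
  let n := (S.length : Int)
  let counts := pvCounts S
  let graph : PySem.Dict (Int × Int) (List (Int × Int)) :=
    (PySem.List.pyRange 0 n).foldl
      (fun g i => (PySem.List.pyRange (i + 1) n).foldl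
        (fun g j => g.insert (i, j) PySem.Set.empty) g)
      PySem.Dict.empty
  let graph :=
    (PySem.List.pyRange 0 n).foldl
      (fun g i => (PySem.List.pyRange (i + 1) n).foldl
        (fun g j =>
          if counts.getD (i, j) 0 = 2 then
            let inter := PySem.List.sorted
              (PySem.Set.inter (PySem.Set.ofList (PySem.List.pyGetD S i []))
                               (PySem.Set.ofList (PySem.List.pyGetD S j []))) id
            let x := PySem.List.pyGetD inter 0 0
            let y := PySem.List.pyGetD inter 1 0
            let g1 := g.insert (i, j) (PySem.Set.add (g.getD (i, j) PySem.Set.empty) (x, y))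
            let g2 := g1.setdefault (x, y) PySem.Set.empty
            g2.insert (x, y) (PySem.Set.add (g2.getD (x, y) PySem.Set.empty) (i, j))
          else g)
        g)
      graph
  graph.items.map (fun kv => (kv.1.1, kv.1.2, kv.2))

-- ===== PRECONDITION & SPEC =====
def Spec_forced_perpendicular_graph (S : List (List Int)) (out : List (Int × Int × List (Int × Int))) : Prop := out = forced_perpendicular_graph_alt S
instance (S : List (List Int)) (out : List (Int × Int × List (Int × Int))) : Decidable (Spec_forced_perpendicular_graph S out) := by unfold Spec_forced_perpendicular_graph; infer_instance

-- ===== CLAIM (what is proved, stated in full; the proofs are below) =====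
def Claim_equal_forced_perpendicular_graph : Prop := ∀ (S : List (List Int)), Dom_forced_perpendicular_graph S → Spec_forced_perpendicular_graph S (forced_perpendicular_graph S)


-- ===== LEMMAS AND PROOFS =====

-- proof-side abbreviations
def pvR (S : List (List Int)) : List Int := PySem.List.pyRange 0 (S.length : Int)

def pvW (S : List (List Int)) (i : Int) : PySem.Set Int :=
  PySem.Set.ofList (PySem.List.pyGetD S i [])

-- the per-pair content of phi_map as an Option
def pvPhiF (S : List (List Int)) (q : Int × Int) : Option ((Int × Int) × (Int × Int)) :=
  let witness_sets := S.map (fun row => PySem.Set.ofList row)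
  let inter := PySem.List.sorted
    (PySem.Set.inter (PySem.List.pyGetD witness_sets q.1 [])
                     (PySem.List.pyGetD witness_sets q.2 [])) id
  if inter.length = 2 then
    some (pvNorm q.1 q.2, pvNorm (PySem.List.pyGetD inter 0 0) (PySem.List.pyGetD inter 1 0))
  else none

-- A's per-edge dict update
def pvStep (g : PySem.Dict (Int × Int) (List (Int × Int))) (st : (Int × Int) × (Int × Int)) :
    PySem.Dict (Int × Int) (List (Int × Int)) :=
  let g1 := g.setdefault st.1 PySem.Set.empty
  let g2 := g1.insert st.1 (PySem.Set.add (g1.getD st.1 PySem.Set.empty) st.2)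
  let g3 := g2.setdefault st.2 PySem.Set.empty
  g3.insert st.2 (PySem.Set.add (g3.getD st.2 PySem.Set.empty) st.1)

-- B's per-pair conditional update
def pvBodyB (S : List (List Int)) (g : PySem.Dict (Int × Int) (List (Int × Int))) (q : Int × Int) :
    PySem.Dict (Int × Int) (List (Int × Int)) :=
  if (pvCounts S).getD q 0 = 2 then
    let inter := PySem.List.sorted
      (PySem.Set.inter (PySem.Set.ofList (PySem.List.pyGetD S q.1 []))
                       (PySem.Set.ofList (PySem.List.pyGetD S q.2 []))) id
    let x := PySem.List.pyGetD inter 0 0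
    let y := PySem.List.pyGetD inter 1 0
    let g1 := g.insert q (PySem.Set.add (g.getD q PySem.Set.empty) (x, y))
    let g2 := g1.setdefault (x, y) PySem.Set.empty
    g2.insert (x, y) (PySem.Set.add (g2.getD (x, y) PySem.Set.empty) q)
  else g

theorem pv_pyRange_pairwise (a b : Int) : (PySem.List.pyRange a b).Pairwise (· < ·) := by
  generalize hk : (b - a).toNat = k
  induction k generalizing a with
  | zero =>
    have : ¬ a < b := by omega
    have hnil : PySem.List.pyRange a b = [] := by
      apply List.eq_nil_of_length_eq_zero
      rw [PySem.List.length_pyRange_one]; omega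
    rw [hnil]; exact List.Pairwise.nil
  | succ k ih =>
    have hab : a < b := by omega
    rw [PySem.List.pyRange_one_cons hab]
    refine List.Pairwise.cons ?_ (ih (a + 1) (by omega))
    intro x hx
    have := (PySem.List.mem_pyRange_one).mp hx
    omega

theorem pv_comb2_mem (l : List Int) (hl : l.Pairwise (· < ·)) (i j : Int) :
    (i, j) ∈ pvComb2 l ↔ i ∈ l ∧ j ∈ l ∧ i < j := by
  induction l with
  | nil => simp [pvComb2]
  | cons x xs ih =>
    have hx : ∀ y ∈ xs, x < y := fun y hy => (List.pairwise_cons.mp hl).1 y hy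
    have ih' := ih (List.pairwise_cons.mp hl).2
    simp only [pvComb2, List.mem_append, List.mem_map, List.mem_cons, ih']
    constructor
    · rintro (⟨y, hy, he⟩ | ⟨hi, hj, hij⟩)
      · cases he; exact ⟨Or.inl rfl, Or.inr hy, hx _ hy⟩
      · exact ⟨Or.inr hi, Or.inr hj, hij⟩
    · rintro ⟨hi | hi, hj | hj, hij⟩
      · omega
      · exact Or.inl ⟨j, hj, by rw [hi]⟩
      · exact absurd (hx i hi) (by omega)
      · exact Or.inr ⟨hi, hj, hij⟩

theorem pv_comb2_fst_mem (l : List Int) (p : Int × Int) (hp : p ∈ pvComb2 l) : p.1 ∈ l := by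
  induction l with
  | nil => simp [pvComb2] at hp
  | cons x xs ih =>
    simp only [pvComb2, List.mem_append, List.mem_map] at hp
    rcases hp with ⟨y, _, he⟩ | hp
    · cases he; exact List.mem_cons_self
    · exact List.mem_cons_of_mem _ (ih hp)

theorem pv_comb2_nodup (l : List Int) (hl : l.Pairwise (· < ·)) : (pvComb2 l).Nodup := by
  induction l with
  | nil => exact List.nodup_nil
  | cons x xs ih =>
    have hx : ∀ y ∈ xs, x < y := fun y hy => (List.pairwise_cons.mp hl).1 y hy
    have hxs := (List.pairwise_cons.mp hl).2
    simp only [pvComb2]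
    refine List.Nodup.append ?_ (ih hxs) ?_
    · exact (hxs.nodup).map (fun a b h => by cases h; rfl)
    · intro p hp1 hp2
      obtain ⟨y, hy, he⟩ := List.mem_map.mp hp1
      have := pv_comb2_fst_mem xs p hp2
      cases he
      exact absurd (hx _ this) (by omega)

theorem pv_comb2_flat (a b : Int) :
    pvComb2 (PySem.List.pyRange a b)
      = (PySem.List.pyRange a b).flatMap
          (fun i => (PySem.List.pyRange (i + 1) b).map (fun j => (i, j))) := by
  generalize hk : (b - a).toNat = k
  induction k generalizing a with
  | zero =>
    have hnil : PySem.List.pyRange a b = [] := by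
      apply List.eq_nil_of_length_eq_zero
      rw [PySem.List.length_pyRange_one]; omega
    rw [hnil]; rfl
  | succ k ih =>
    have hab : a < b := by omega
    rw [PySem.List.pyRange_one_cons hab]
    simp only [pvComb2, List.flatMap_cons]
    rw [ih (a + 1) (by omega)]

theorem pv_foldl_opt {β γ σ : Type} (l : List β) (f : β → Option γ) (step : σ → γ → σ) (init : σ) :
    (l.filterMap f).foldl step init
      = l.foldl (fun g x => (f x).elim g (step g)) init := by
  induction l generalizing init with
  | nil => rfl
  | cons x xs ih =>
    rw [List.filterMap_cons]
    cases hfx : f x <;>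
      simp only [List.foldl_cons, hfx, ih, Option.elim_none, Option.elim_some]

theorem pv_foldl_congr_inv {σ β : Type} (P : σ → Prop) (l : List β) (f f' : σ → β → σ) (init : σ)
    (h0 : P init) (heq : ∀ g x, P g → x ∈ l → f g x = f' g x)
    (hp : ∀ g x, P g → x ∈ l → P (f g x)) : l.foldl f init = l.foldl f' init := by
  induction l generalizing init with
  | nil => rfl
  | cons x xs ih =>
    simp only [List.foldl_cons]
    rw [← heq init x h0 List.mem_cons_self]
    exact ih (f init x) (hp init x h0 List.mem_cons_self)
      (fun g y hg hy => heq g y hg (List.mem_cons_of_mem _ hy))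
      (fun g y hg hy => hp g y hg (List.mem_cons_of_mem _ hy))

theorem pv_filter_map_pair {C D : Type} [BEq C] [LawfulBEq C] (m : List C) (hm : m.Nodup)
    (a : D) (c : C) :
    (m.map (fun y => (y, a))).filter (fun q => q.1 == c) = if c ∈ m then [(c, a)] else [] := by
  induction m with
  | nil => simp
  | cons x xs ih =>
    have hx := (List.nodup_cons.mp hm).1
    have ih' := ih (List.nodup_cons.mp hm).2
    by_cases hxc : x = c
    · subst hxc
      simp only [List.map_cons, List.filter_cons, beq_self_eq_true, if_pos, List.mem_cons,
        true_or, ih', if_neg hx]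
    · simp only [List.map_cons, List.filter_cons]
      have : ((x, a).1 == c) = false := by simpa using hxc
      simp only [this, Bool.false_eq_true, if_false, ih', List.mem_cons]
      by_cases hc : c ∈ xs <;> simp [hc, Ne.symm hxc]

theorem pv_flat_filter {B C D : Type} [BEq C] [LawfulBEq C] (l : List (D × B)) (F : B → List C)
    (hF : ∀ e ∈ l, (F e.2).Nodup) (c : C) :
    ((l.flatMap (fun e => (F e.2).map (fun y => (y, e.1)))).filter (fun q => q.1 == c)).map (fun q => q.2)
      = (l.filter (fun e => decide (c ∈ F e.2))).map (fun e => e.1) := by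
  induction l with
  | nil => rfl
  | cons e es ih =>
    have ih' := ih (fun x hx => hF x (List.mem_cons_of_mem _ hx))
    simp only [List.flatMap_cons, List.filter_append, List.map_append,
      pv_filter_map_pair (F e.2) (hF e List.mem_cons_self) e.1 c, List.filter_cons, ih']
    by_cases hc : c ∈ F e.2 <;> simp [hc]

theorem pv_index_eq_flat (S : List (List Int)) :
    pvIndex S = ((PySem.List.enumerate S).flatMap
        (fun p => (PySem.Set.ofList p.2).map (fun v => (v, p.1)))).foldl
      (fun d q => d.modify q.1 [] (fun l => l ++ [q.2])) PySem.Dict.empty := by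
  rw [List.foldl_flatMap]
  simp only [List.foldl_map]
  rfl

theorem pv_index_getD (S : List (List Int)) (v : Int) :
    (pvIndex S).getD v []
      = (pvR S).filter (fun i => decide (v ∈ PySem.Set.ofList (PySem.List.pyGetD S i []))) := by
  rw [pv_index_eq_flat, PySem.Dict.getD_foldl_modify_append]
  rw [pv_flat_filter (PySem.List.enumerate S) (fun row => PySem.Set.ofList row)
    (fun e _ => PySem.Set.nodup_ofList e.2) v]
  rw [PySem.List.enumerate_eq_map_pyRange S [], List.filter_map, List.map_map]
  simp [PySem.List.len, pvR, Function.comp_def]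

theorem pv_index_getD_pairwise (S : List (List Int)) (v : Int) :
    ((pvIndex S).getD v []).Pairwise (· < ·) := by
  rw [pv_index_getD]
  exact (pv_pyRange_pairwise 0 (S.length : Int)).filter _

theorem pv_index_mem_getD (S : List (List Int)) (v i : Int) :
    i ∈ (pvIndex S).getD v [] ↔ 0 ≤ i ∧ i < (S.length : Int) ∧ v ∈ pvW S i := by
  rw [pv_index_getD]
  simp only [List.mem_filter, pvR, PySem.List.mem_pyRange_one, decide_eq_true_eq, pvW]
  tauto

theorem pv_index_keys_nodup (S : List (List Int)) : (pvIndex S).keys.Nodup := by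
  rw [pv_index_eq_flat]
  exact PySem.Dict.nodup_keys_foldl_modify_key
    (key := fun (q : Int × Int) => q.1)
    (f := fun _ (q : Int × Int) (l : List Int) => l ++ [q.2])
    _ _ _ PySem.Dict.nodup_keys_empty

theorem pv_index_mem_keys (S : List (List Int)) (v i : Int)
    (h : i ∈ (pvIndex S).getD v []) : v ∈ (pvIndex S).keys := by
  obtain ⟨h0, hn, hw⟩ := (pv_index_mem_getD S v i).mp h
  rw [pv_index_eq_flat,
    PySem.Dict.keys_foldl_modify_key
      (key := fun (q : Int × Int) => q.1)
      (f := fun _ (q : Int × Int) (l : List Int) => l ++ [q.2])]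
  have : (PySem.Dict.empty : PySem.Dict Int (List Int)).keys = [] := by
    simp [PySem.Dict.keys_empty]
  rw [this, PySem.Set.update_nil_left, PySem.Set.mem_ofList]
  simp only [List.mem_map, List.mem_flatMap]
  refine ⟨(v, i), ⟨(i, PySem.List.pyGetD S i []), ?_, ?_⟩, rfl⟩
  · rw [PySem.List.enumerate_eq_map_pyRange S []]
    exact List.mem_map.mpr ⟨i, by rw [PySem.List.mem_pyRange_one]; constructor <;> simpa [PySem.List.len], rfl⟩
  · exact ⟨v, hw, rfl⟩

-- the ordered list of values common to rows i and j, read off the inverted index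
def pvCommon (S : List (List Int)) (q : Int × Int) : List Int :=
  ((pvIndex S).items.filter (fun e => decide (q ∈ pvComb2 e.2))).map (fun e => e.1)

theorem pv_comb2_nodup_of_item (S : List (List Int)) (e : Int × List Int)
    (he : e ∈ (pvIndex S).items) : (pvComb2 e.2).Nodup := by
  have hg : (pvIndex S).get? e.1 = some e.2 :=
    (PySem.Dict.get?_eq_some_iff_mem_items _ _ _ (pv_index_keys_nodup S)).mpr he
  have : e.2 = (pvIndex S).getD e.1 [] := (PySem.Dict.getD_of_get?_eq_some _ _ hg).symm
  rw [this]
  exact pv_comb2_nodup _ (pv_index_getD_pairwise S e.1)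

theorem pv_count_flat (l : List (Int × List Int)) (hF : ∀ e ∈ l, (pvComb2 e.2).Nodup)
    (q : Int × Int) :
    (l.flatMap (fun e => pvComb2 e.2)).count q
      = (l.filter (fun e => decide (q ∈ pvComb2 e.2))).length := by
  induction l with
  | nil => rfl
  | cons m ms ih =>
    have ih' := ih (fun x hx => hF x (List.mem_cons_of_mem _ hx))
    rw [List.flatMap_cons, List.count_append, List.filter_cons, ih']
    by_cases hq : q ∈ pvComb2 m.2
    · rw [List.count_eq_one_of_mem (hF m List.mem_cons_self) hq]
      simp [hq]
      omega
    · rw [List.count_eq_zero.mpr hq]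
      simp [hq]

theorem pv_counts_getD (S : List (List Int)) (q : Int × Int) :
    (pvCounts S).getD q 0 = ((pvCommon S q).length : Int) := by
  have hflat : pvCounts S
      = (((pvIndex S).values.flatMap pvComb2).foldl
          (fun c pq => c.modify pq 0 (fun x => x + 1)) PySem.Dict.empty) := by
    rw [List.foldl_flatMap]
    rfl
  rw [hflat, PySem.Dict.getD_foldl_modify_add_one, PySem.Dict.getD_empty]
  have hvals : (pvIndex S).values = (pvIndex S).items.map (fun e => e.2) := rfl
  rw [hvals, List.flatMap_map]
  have := pv_count_flat ((pvIndex S).items) (fun e he => pv_comb2_nodup_of_item S e he) q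
  rw [this, zero_add, pvCommon, List.length_map]

theorem pv_common_nodup (S : List (List Int)) (q : Int × Int) : (pvCommon S q).Nodup := by
  have hsub : (pvCommon S q).Sublist ((pvIndex S).items.map (fun e => e.1)) :=
    List.filter_sublist.map _
  exact (pv_index_keys_nodup S).sublist hsub

theorem pv_common_perm (S : List (List Int)) (i j : Int) (h0 : 0 ≤ i) (hij : i < j)
    (hj : j < (S.length : Int)) :
    (pvCommon S (i, j)).Perm (PySem.Set.inter (pvW S i) (pvW S j)) := by
  have hWi : (pvW S i).Nodup := PySem.Set.nodup_ofList _
  rw [List.perm_ext_iff_of_nodup (pv_common_nodup S (i, j))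
    (PySem.Set.nodup_inter _ _ hWi)]
  intro v
  rw [PySem.Set.mem_inter, pvCommon]
  constructor
  · intro hv
    obtain ⟨e, he, hfst⟩ := List.mem_map.mp hv
    obtain ⟨hei, hcond⟩ := List.mem_filter.mp he
    have hg : (pvIndex S).get? e.1 = some e.2 :=
      (PySem.Dict.get?_eq_some_iff_mem_items _ _ _ (pv_index_keys_nodup S)).mpr hei
    have he2 : e.2 = (pvIndex S).getD e.1 [] := (PySem.Dict.getD_of_get?_eq_some _ _ hg).symm
    have hcond' : (i, j) ∈ pvComb2 ((pvIndex S).getD v []) := by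
      rw [← hfst, ← he2]; exact of_decide_eq_true hcond
    have hmem := (pv_comb2_mem _ (pv_index_getD_pairwise S v) i j).mp hcond'
    exact ⟨((pv_index_mem_getD S v i).mp hmem.1).2.2, ((pv_index_mem_getD S v j).mp hmem.2.1).2.2⟩
  · rintro ⟨hvi, hvj⟩
    have hi : i ∈ (pvIndex S).getD v [] := (pv_index_mem_getD S v i).mpr ⟨h0, by omega, hvi⟩
    have hj' : j ∈ (pvIndex S).getD v [] := (pv_index_mem_getD S v j).mpr ⟨by omega, hj, hvj⟩
    have hcond : (i, j) ∈ pvComb2 ((pvIndex S).getD v []) :=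
      (pv_comb2_mem _ (pv_index_getD_pairwise S v) i j).mpr ⟨hi, hj', hij⟩
    have hkey : v ∈ (pvIndex S).keys := pv_index_mem_keys S v i hi
    obtain ⟨w, hw⟩ : ∃ w, (pvIndex S).get? v = some w := by
      cases hg : (pvIndex S).get? v with
      | none => exact absurd ((PySem.Dict.get?_eq_none_iff_not_mem_keys _ _).mp hg) (by simp [hkey])
      | some w => exact ⟨w, rfl⟩
    have hwv : w = (pvIndex S).getD v [] := (PySem.Dict.getD_of_get?_eq_some _ _ hw).symm
    have hitem : (v, w) ∈ (pvIndex S).items := PySem.Dict.mem_items_of_get?_eq_some _ hw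
    refine List.mem_map.mpr ⟨(v, w), List.mem_filter.mpr ⟨hitem, ?_⟩, rfl⟩
    simp only [hwv, decide_eq_true_eq]
    exact hcond

theorem pv_ws_getD (S : List (List Int)) (i : Int) (h0 : 0 ≤ i) (hi : i < (S.length : Int)) :
    PySem.List.pyGetD (S.map (fun row => PySem.Set.ofList row)) i [] = pvW S i := by
  rw [PySem.List.pyGetD_eq_getElem _ _ h0 (by simpa using hi)]
  rw [List.getElem_map]
  rw [pvW, PySem.List.pyGetD_eq_getElem _ _ h0 hi]

theorem pv_pairBody (S : List (List Int)) (i j : Int) (h0 : 0 ≤ i) (hij : i < j)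
    (hj : j < (S.length : Int)) (g : PySem.Dict (Int × Int) (List (Int × Int)))
    (hg : g.contains (i, j) = true) :
    pvBodyB S g (i, j) = (pvPhiF S (i, j)).elim g (pvStep g) := by
  have hperm := pv_common_perm S i j h0 hij hj
  have hws1 := pv_ws_getD S i h0 (by omega)
  have hws2 := pv_ws_getD S j (by omega) hj
  have hInd : (PySem.Set.inter (pvW S i) (pvW S j)).Nodup :=
    PySem.Set.nodup_inter _ _ (PySem.Set.nodup_ofList _)
  have hcnt : (pvCounts S).getD (i, j) 0
      = ((PySem.Set.inter (pvW S i) (pvW S j)).length : Int) := by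
    rw [pv_counts_getD, hperm.length_eq]
  by_cases hlen : (PySem.Set.inter (pvW S i) (pvW S j)).length = 2
  · -- size-2 intersection: both sides insert the same edge
    have hslen : (PySem.List.sorted (PySem.Set.inter (pvW S i) (pvW S j)) id).length = 2 := by
      rw [PySem.List.length_sorted]; exact hlen
    obtain ⟨u, v, huv⟩ := List.length_eq_two.mp hslen
    have hsp : (PySem.List.sorted (PySem.Set.inter (pvW S i) (pvW S j)) id).Perm
        (PySem.Set.inter (pvW S i) (pvW S j)) := PySem.List.sorted_perm _ _ _
    have hnd : (PySem.List.sorted (PySem.Set.inter (pvW S i) (pvW S j)) id).Nodup :=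
      hsp.nodup_iff.mpr hInd
    have hule : u ≤ v := by
      have := PySem.List.sorted_pairwise (PySem.Set.inter (pvW S i) (pvW S j)) id
      rw [huv] at this
      exact (List.pairwise_cons.mp this).1 v List.mem_cons_self
    have hune : u ≠ v := by
      rw [huv] at hnd
      simp only [List.nodup_cons, List.mem_singleton] at hnd
      exact hnd.1
    have hult : u < v := lt_of_le_of_ne hule hune
    have hphi : pvPhiF S (i, j) = some ((i, j), (u, v)) := by
      simp only [pvPhiF]
      rw [hws1, hws2, if_pos hslen, huv]
      have e0 : PySem.List.pyGetD ([u, v] : List Int) 0 0 = u := rfl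
      have e1 : PySem.List.pyGetD ([u, v] : List Int) 1 0 = v := rfl
      rw [e0, e1]
      simp [pvNorm, hij, hult]
    have hcnt2 : (pvCounts S).getD (i, j) 0 = 2 := by rw [hcnt, hlen]; rfl
    simp only [pvBodyB, hphi, if_pos hcnt2, Option.elim_some]
    have huv' : PySem.List.sorted
        (PySem.Set.inter (PySem.Set.ofList (PySem.List.pyGetD S i []))
                         (PySem.Set.ofList (PySem.List.pyGetD S j []))) id = [u, v] := huv
    rw [huv']
    show _ = pvStep g ((i, j), (u, v))
    simp only [pvStep]
    rw [PySem.Dict.setdefault_of_contains _ _ hg]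
    rfl
  · -- any other intersection size: both sides leave the graph unchanged
    have hcnt2 : ¬ (pvCounts S).getD (i, j) 0 = 2 := by
      rw [hcnt]
      intro h
      exact hlen (by exact_mod_cast h)
    have hphi : pvPhiF S (i, j) = none := by
      simp only [pvPhiF]
      rw [hws1, hws2, if_neg]
      rw [PySem.List.length_sorted]
      exact hlen
    simp only [pvBodyB, hphi, if_neg hcnt2, Option.elim_none]

theorem pv_phiF_fst (S : List (List Int)) (q : Int × Int) (hq : q.1 < q.2) (e : (Int × Int) × (Int × Int))
    (he : pvPhiF S q = some e) : e.1 = q := by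
  simp only [pvPhiF] at he
  split at he
  · cases he
    simp [pvNorm, hq]
  · cases he

theorem pv_filterMap_fst_sublist {γ : Type} (l : List (Int × Int)) (f : Int × Int → Option ((Int × Int) × γ))
    (hf : ∀ q ∈ l, ∀ e, f q = some e → e.1 = q) :
    ((l.filterMap f).map (fun e => e.1)).Sublist l := by
  induction l with
  | nil => simp
  | cons x xs ih =>
    have ih' := ih (fun q hq e he => hf q (List.mem_cons_of_mem _ hq) e he)
    rw [List.filterMap_cons]
    cases hfx : f x with
    | none => exact (ih').cons x
    | some e =>
      rw [List.map_cons, hf x List.mem_cons_self e hfx]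
      exact ih'.cons₂ x

theorem pv_phi_items (S : List (List Int)) :
    (pvPhi S).items = (pvComb2 (pvR S)).filterMap (pvPhiF S) := by
  have hpw := pv_pyRange_pairwise 0 (S.length : Int)
  have h1 : pvPhi S = (pvComb2 (pvR S)).foldl
      (fun out q => (pvPhiF S q).elim out (fun e => out.insert e.1 e.2))
      PySem.Dict.empty := by
    simp only [pvPhi]
    refine PySem.List.foldl_congr_mem _ _ _ _ ?_
    intro acc q _
    simp only [pvPhiF]
    by_cases hc : (PySem.List.sorted
        (PySem.Set.inter (PySem.List.pyGetD (S.map (fun row => PySem.Set.ofList row)) q.1 [])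
                         (PySem.List.pyGetD (S.map (fun row => PySem.Set.ofList row)) q.2 [])) id).length = 2
    · simp only [hc, if_pos, Option.elim_some]
    · simp only [hc, ite_false, Option.elim_none]
  rw [h1, ← pv_foldl_opt]
  have hf : ∀ q ∈ pvComb2 (pvR S), ∀ e, pvPhiF S q = some e → e.1 = q := by
    rintro ⟨a, b⟩ hq e he
    exact pv_phiF_fst S (a, b) ((pv_comb2_mem _ hpw a b).mp hq).2.2 e he
  have hnd : (((pvComb2 (pvR S)).filterMap (pvPhiF S)).map (fun e => e.1)).Nodup :=
    (pv_comb2_nodup _ hpw).sublist (pv_filterMap_fst_sublist _ _ hf)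
  have hit := PySem.Dict.items_foldl_insert_fresh
    (l := (pvComb2 (pvR S)).filterMap (pvPhiF S))
    (k := fun e => e.1) (v := fun e => e.2)
    (d := PySem.Dict.empty) (fun a _ => PySem.Dict.contains_empty _) hnd
  refine hit.trans ?_
  simp [PySem.Dict.empty]

theorem pv_bodyB_contains (S : List (List Int)) (g : PySem.Dict (Int × Int) (List (Int × Int)))
    (q q' : Int × Int) (h : g.contains q' = true) : (pvBodyB S g q).contains q' = true := by
  simp only [pvBodyB]
  by_cases hc : (pvCounts S).getD q 0 = 2
  · simp only [if_pos hc, PySem.Dict.contains_insert, PySem.Dict.contains_setdefault, h]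
    simp
  · simp only [if_neg hc]; exact h

theorem pv_main (S : List (List Int)) :
    forced_perpendicular_graph S = forced_perpendicular_graph_alt S := by
  have hpw := pv_pyRange_pairwise 0 (S.length : Int)
  have hA0 : (pvComb2 (pvR S)).foldl
        (fun g ij => g.insert (pvNorm ij.1 ij.2) PySem.Set.empty) (PySem.Dict.empty : PySem.Dict (Int × Int) (List (Int × Int)))
      = (pvComb2 (pvR S)).foldl
        (fun g (q : Int × Int) => g.insert q PySem.Set.empty) (PySem.Dict.empty : PySem.Dict (Int × Int) (List (Int × Int))) := by
    refine PySem.List.foldl_congr_mem _ _ _ _ ?_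
    rintro acc ⟨a, b⟩ hq
    have hab := ((pv_comb2_mem _ hpw a b).mp hq).2.2
    simp [pvNorm, hab]
  have hB0 : (PySem.List.pyRange 0 (S.length : Int)).foldl
        (fun g i => (PySem.List.pyRange (i + 1) (S.length : Int)).foldl
          (fun g j => g.insert (i, j) PySem.Set.empty) g) (PySem.Dict.empty : PySem.Dict (Int × Int) (List (Int × Int)))
      = (pvComb2 (pvR S)).foldl
        (fun g (q : Int × Int) => g.insert q PySem.Set.empty) (PySem.Dict.empty : PySem.Dict (Int × Int) (List (Int × Int))) := by
    simp only [pvR]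
    rw [pv_comb2_flat, List.foldl_flatMap]
    simp only [List.foldl_map]
  have hG0c : ∀ q ∈ pvComb2 (pvR S),
      ((pvComb2 (pvR S)).foldl
        (fun g (q : Int × Int) => g.insert q PySem.Set.empty) (PySem.Dict.empty : PySem.Dict (Int × Int) (List (Int × Int)))).contains q = true := by
    intro q hq
    rw [PySem.Dict.contains_iff_mem_keys,
      PySem.Dict.keys_foldl_insert _ (fun _ _ => PySem.Set.empty)]
    have : (PySem.Dict.empty : PySem.Dict (Int × Int) (List (Int × Int))).keys = [] := by
      simp [PySem.Dict.keys_empty]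
    rw [this, PySem.Set.update_nil_left, PySem.Set.mem_ofList]
    exact hq
  have hBnest : ∀ g0 : PySem.Dict (Int × Int) (List (Int × Int)),
      (PySem.List.pyRange 0 (S.length : Int)).foldl
        (fun g i => (PySem.List.pyRange (i + 1) (S.length : Int)).foldl
          (fun g j => pvBodyB S g (i, j)) g) g0
      = (pvComb2 (pvR S)).foldl (pvBodyB S) g0 := by
    intro g0
    simp only [pvR]
    rw [pv_comb2_flat, List.foldl_flatMap]
    simp only [List.foldl_map]
  have hphase : (pvComb2 (pvR S)).foldl (pvBodyB S)
        ((pvComb2 (pvR S)).foldl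
          (fun g (q : Int × Int) => g.insert q PySem.Set.empty) (PySem.Dict.empty : PySem.Dict (Int × Int) (List (Int × Int))))
      = (pvPhi S).items.foldl pvStep
        ((pvComb2 (pvR S)).foldl
          (fun g (q : Int × Int) => g.insert q PySem.Set.empty) (PySem.Dict.empty : PySem.Dict (Int × Int) (List (Int × Int)))) := by
    rw [pv_phi_items, pv_foldl_opt]
    refine pv_foldl_congr_inv
      (P := fun g => ∀ q ∈ pvComb2 (pvR S), g.contains q = true) _ _ _ _ hG0c ?_ ?_
    · rintro g ⟨a, b⟩ hg hq
      have hm := (pv_comb2_mem _ hpw a b).mp hq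
      have ha : 0 ≤ a := by
        have := hm.1; rw [PySem.List.mem_pyRange_one] at this; omega
      have hb : b < (S.length : Int) := by
        have := hm.2.1; rw [PySem.List.mem_pyRange_one] at this; omega
      exact pv_pairBody S a b ha hm.2.2 hb g (hg _ hq)
    · intro g q hg _ q' hq'
      exact pv_bodyB_contains S g q q' (hg q' hq')
  calc forced_perpendicular_graph S
      = ((pvPhi S).items.foldl pvStep
          ((pvComb2 (pvR S)).foldl
            (fun g ij => g.insert (pvNorm ij.1 ij.2) PySem.Set.empty)
            (PySem.Dict.empty : PySem.Dict (Int × Int) (List (Int × Int))))).items.map (fun kv => (kv.1.1, kv.1.2, kv.2)) := rfl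
    _ = ((PySem.List.pyRange 0 (S.length : Int)).foldl
          (fun g i => (PySem.List.pyRange (i + 1) (S.length : Int)).foldl
            (fun g j => pvBodyB S g (i, j)) g)
          ((PySem.List.pyRange 0 (S.length : Int)).foldl
            (fun g i => (PySem.List.pyRange (i + 1) (S.length : Int)).foldl
              (fun g j => g.insert (i, j) PySem.Set.empty) g)
            (PySem.Dict.empty : PySem.Dict (Int × Int) (List (Int × Int))))).items.map (fun kv => (kv.1.1, kv.1.2, kv.2)) := by
        rw [hA0, ← hphase, ← hBnest, ← hB0]
    _ = forced_perpendicular_graph_alt S := rfl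

-- ===== VERDICT (by name: the statement is the Claim_ definition above) =====
theorem forced_perpendicular_graph_spec : Claim_equal_forced_perpendicular_graph := by
  intro S _
  show _ = _
  exact pv_main S
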